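-- pv_equiv track=rewrite | github.com/IHateTheWorld/At_HIT | NLP/CWS/cws_hmm.py | generate_seg
-- ===== SOURCE A (Python) =====
-- def generate_seg(pred_tag, sent):
--     assert len(pred_tag) == len(sent)
--     seg = []
--     #assert pred_tag[-1] == 'S' or pred_tag[-1] == 'E'
--     for i in range(len(pred_tag)):
--         if 0 == i:
--             assert pred_tag[0] == 'S' or pred_tag[0] == 'B'
--             seg.append(sent[0])
--         elif pred_tag[i] == 'B' or pred_tag[i] == 'S':
--             seg.append(sent[i])
--         else:
--             seg[-1] += sent[i]
--     return seg
-- ===== SOURCE B (Python) =====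
-- def generate_seg(pred_tag, sent):
--     assert len(pred_tag) == len(sent)
--     if not pred_tag:
--         return []
--     assert pred_tag[0] == 'S' or pred_tag[0] == 'B'
--     starts = [0] + [i for i in range(1, len(pred_tag))
--                     if pred_tag[i] == 'B' or pred_tag[i] == 'S']
--     ends = starts[1:] + [len(sent)]
--     return [''.join(sent[a:b]) for a, b in zip(starts, ends)]
-- ===== Notes on version B (the rewrite author's own statement) =====
-- stated objective: alternative
-- what changed: Replaces the interleaved append/concatenate-into-last-element loop by a two-pass scheme: first compute the list of segment start indices (0 plus every i>0 tagged 'B' or 'S'), then join the slices of sent between consecutive start indices.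
import Mathlib
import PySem

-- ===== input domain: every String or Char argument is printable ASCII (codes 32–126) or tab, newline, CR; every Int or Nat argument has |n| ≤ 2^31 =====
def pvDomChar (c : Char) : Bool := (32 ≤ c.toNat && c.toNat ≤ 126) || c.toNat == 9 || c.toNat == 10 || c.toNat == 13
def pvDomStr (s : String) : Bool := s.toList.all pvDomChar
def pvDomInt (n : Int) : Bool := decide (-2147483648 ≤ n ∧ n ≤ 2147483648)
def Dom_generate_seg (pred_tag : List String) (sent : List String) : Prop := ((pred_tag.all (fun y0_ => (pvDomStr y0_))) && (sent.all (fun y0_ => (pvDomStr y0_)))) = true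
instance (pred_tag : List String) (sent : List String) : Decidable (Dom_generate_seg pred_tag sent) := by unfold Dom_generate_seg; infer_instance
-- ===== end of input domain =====

-- B replaces A's interleaved append/extend loop by computing segment start indices first and then joining slices of sent between consecutive starts (alternative decomposition, same cost).


-- ===== PORT A =====
-- A's for-loop over range(len(pred_tag)) with the mutable list seg:
-- i = 0 appends sent[0]; tag 'B'/'S' appends sent[i]; otherwise seg[-1] += sent[i].
-- Indexing uses getD "": Pre_ guarantees equal lengths so every index is in range,
-- and the asserts (excluded by Pre_) can never fire inside Pre_.
def generate_seg_loop (pred_tag : List String) (sent : List String) (i : Nat) (seg : List String) : List String :=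
  if _h : i < pred_tag.length then
    if i = 0 then
      generate_seg_loop pred_tag sent (i + 1) (seg ++ [sent.getD 0 ""])
    else if pred_tag.getD i "" = "B" ∨ pred_tag.getD i "" = "S" then
      generate_seg_loop pred_tag sent (i + 1) (seg ++ [sent.getD i ""])
    else
      generate_seg_loop pred_tag sent (i + 1) (seg.dropLast ++ [(seg.getLast?.getD "") ++ sent.getD i ""])
  else seg
termination_by pred_tag.length - i

def generate_seg (pred_tag : List String) (sent : List String) : List String :=
  generate_seg_loop pred_tag sent 0 []

-- ===== PORT B =====
-- B: early return [] on empty input; starts = 0 :: [i in range(1, n) with tag 'B'/'S'];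
-- result = join(sent[a:b]) for consecutive (a, b) in zip(starts, starts[1:] + [n]).
-- sent[a:b] with 0 ≤ a ≤ b is exactly (sent.drop a).take (b - a).
def generate_seg_alt (pred_tag : List String) (sent : List String) : List String :=
  if pred_tag = [] then []
  else
    let starts : List Nat :=
      0 :: (List.range' 1 (pred_tag.length - 1)).filter
        (fun i => pred_tag.getD i "" = "B" || pred_tag.getD i "" = "S")
    let ends : List Nat := starts.drop 1 ++ [sent.length]
    (starts.zip ends).map (fun p => String.join ((sent.drop p.1).take (p.2 - p.1)))

-- ===== PRECONDITION & SPEC =====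
-- Pre_ excludes exactly the inputs on which A's asserts raise AssertionError:
-- unequal lengths, or a non-empty pred_tag not starting with 'S' or 'B'.
def Pre_generate_seg (pred_tag : List String) (sent : List String) : Prop :=
  pred_tag.length = sent.length ∧
    (pred_tag ≠ [] → (pred_tag.getD 0 "" = "S" ∨ pred_tag.getD 0 "" = "B"))
instance (pred_tag : List String) (sent : List String) : Decidable (Pre_generate_seg pred_tag sent) := by unfold Pre_generate_seg; infer_instance

def pvWitness_generate_seg : List String × List String := (["B", "E", "S"], ["ab", "cd", "x"])

def Spec_generate_seg (pred_tag : List String) (sent : List String) (out : List String) : Prop := out = generate_seg_alt pred_tag sent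
instance (pred_tag : List String) (sent : List String) (out : List String) : Decidable (Spec_generate_seg pred_tag sent out) := by unfold Spec_generate_seg; infer_instance

-- ===== CLAIM (what is proved, stated in full; the proofs are below) =====
def Claim_equal_generate_seg : Prop := ∀ (pred_tag : List String) (sent : List String), Dom_generate_seg pred_tag sent → Pre_generate_seg pred_tag sent → Spec_generate_seg pred_tag sent (generate_seg pred_tag sent)

-- ===== LEMMAS AND PROOFS =====

-- Canonical recursive form both ports are reduced to: process remaining tags/words
-- with the current (still open) segment w as accumulator.
def canonSeg : List String → List String → String → List String
  | t :: ts, s :: ss, w =>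
      if t = "B" ∨ t = "S" then w :: canonSeg ts ss s else canonSeg ts ss (w ++ s)
  | _, _, w => [w]

theorem loopA_eq (ts ss : List String) (hn : ts.length = ss.length) :
    ∀ k i seg w, ts.length - i = k → 1 ≤ i →
      generate_seg_loop ts ss i (seg ++ [w]) = seg ++ canonSeg (ts.drop i) (ss.drop i) w := by
  intro k
  induction k with
  | zero =>
      intro i seg w hk hi
      have hge : ts.length ≤ i := by omega
      rw [generate_seg_loop]
      simp [Nat.not_lt.mpr hge, List.drop_eq_nil_of_le hge, canonSeg]
  | succ k ih =>
      intro i seg w hk hi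
      have hlt : i < ts.length := by omega
      have hlt' : i < ss.length := by omega
      have hts : ts.drop i = ts[i] :: ts.drop (i + 1) := List.drop_eq_getElem_cons hlt
      have hss : ss.drop i = ss[i] :: ss.drop (i + 1) := List.drop_eq_getElem_cons hlt'
      have hgt : ts.getD i "" = ts[i] := by simp [List.getD, List.getElem?_eq_getElem hlt]
      have hgs : ss.getD i "" = ss[i] := by simp [List.getD, List.getElem?_eq_getElem hlt']
      rw [generate_seg_loop]
      have hi0 : ¬ i = 0 := by omega
      by_cases hbs : ts.getD i "" = "B" ∨ ts.getD i "" = "S"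
      · simp only [dif_pos hlt, if_neg hi0, if_pos hbs]
        have := ih (i + 1) (seg ++ [w]) (ss.getD i "") (by omega) (by omega)
        rw [List.append_assoc] at this ⊢
        rw [this, hts, hss, canonSeg]
        rw [hgt] at hbs
        simp [hbs, List.getD, List.getElem?_eq_getElem hlt']
      · simp only [dif_pos hlt, if_neg hi0, if_neg hbs]
        have hdl : (seg ++ [w]).dropLast = seg := by simp
        have hgl : (seg ++ [w]).getLast?.getD "" = w := by simp
        rw [hdl, hgl]
        have := ih (i + 1) seg (w ++ ss.getD i "") (by omega) (by omega)
        rw [this, hts, hss, canonSeg]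
        rw [hgt] at hbs
        simp [hbs, List.getD, List.getElem?_eq_getElem hlt']

theorem join_append_str (l1 l2 : List String) :
    String.join (l1 ++ l2) = String.join l1 ++ String.join l2 := by
  apply String.ext; simp

theorem join_singleton_str (x : String) : String.join [x] = x := by
  apply String.ext; simp

theorem join_take_succ (ss : List String) (a i : Nat) (ha : a ≤ i) (hi : i < ss.length) :
    String.join ((ss.drop a).take (i + 1 - a)) = String.join ((ss.drop a).take (i - a)) ++ ss[i] := by
  have hlen : i - a < (ss.drop a).length := by simp; omega
  have hget : (ss.drop a)[i - a] = ss[i] := by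
    rw [List.getElem_drop]; congr 1; omega
  have hsplit : (ss.drop a).take (i + 1 - a) = (ss.drop a).take (i - a) ++ [(ss.drop a)[i - a]] := by
    have h1 : i + 1 - a = (i - a) + 1 := by omega
    rw [h1, List.take_add_one, List.getElem?_eq_getElem hlen]
    simp
  rw [hsplit, hget, join_append_str, join_singleton_str]

theorem join_slice_one (ss : List String) (a : Nat) (ha : a < ss.length) :
    String.join ((ss.drop a).take (a + 1 - a)) = ss[a] := by
  have h1 : a + 1 - a = 1 := by omega
  rw [h1, List.drop_eq_getElem_cons ha, List.take_succ_cons, List.take_zero, join_singleton_str]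

theorem slicesB_eq (ts ss : List String) (hn : ts.length = ss.length) :
    ∀ k i a, ts.length - i = k → a ≤ i → i ≤ ts.length →
      (((a :: (List.range' i (ts.length - i)).filter
            (fun j => ts.getD j "" = "B" || ts.getD j "" = "S")).zip
        (((List.range' i (ts.length - i)).filter
            (fun j => ts.getD j "" = "B" || ts.getD j "" = "S")) ++ [ss.length])).map
        (fun p => String.join ((ss.drop p.1).take (p.2 - p.1))))
      = canonSeg (ts.drop i) (ss.drop i) (String.join ((ss.drop a).take (i - a))) := by
  intro k
  induction k with
  | zero =>
      intro i a hk ha hile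
      have hie : i = ts.length := by omega
      subst hie
      rw [hk]
      simp [canonSeg, List.drop_eq_nil_of_le (le_of_eq hn), hn]
  | succ k ih =>
      intro i a hk ha hile
      have hlt : i < ts.length := by omega
      have hlt' : i < ss.length := by omega
      have hr : List.range' i (ts.length - i) = i :: List.range' (i + 1) (ts.length - (i + 1)) := by
        have h1 : ts.length - i = (ts.length - (i + 1)) + 1 := by omega
        rw [h1, List.range'_succ]
      have hts : ts.drop i = ts[i] :: ts.drop (i + 1) := List.drop_eq_getElem_cons hlt
      have hss : ss.drop i = ss[i] :: ss.drop (i + 1) := List.drop_eq_getElem_cons hlt'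
      have hgt : ts.getD i "" = ts[i] := by simp [List.getD, List.getElem?_eq_getElem hlt]
      rw [hr]
      by_cases hbs : ts[i] = "B" ∨ ts[i] = "S"
      · have hp : ((ts.getD i "" = "B" : Bool) || (ts.getD i "" = "S" : Bool)) = true := by
          simp only [hgt, Bool.or_eq_true, decide_eq_true_eq]; exact hbs
        simp only [List.filter_cons]
        rw [if_pos hp]
        have htl := ih (i + 1) i (by omega) (by omega) (by omega)
        simp only [List.zip_cons_cons, List.map_cons, List.cons_append] at *
        rw [htl, hts, hss, canonSeg, if_pos hbs]
        have h1 : i + 1 - i = 1 := by omega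
        rw [h1, List.take_succ_cons, List.take_zero, join_singleton_str]
      · have hp : ¬ (((ts.getD i "" = "B" : Bool) || (ts.getD i "" = "S" : Bool)) = true) := by
          simp only [hgt, Bool.or_eq_true, decide_eq_true_eq]; exact hbs
        simp only [List.filter_cons]
        rw [if_neg hp]
        have htl := ih (i + 1) a (by omega) (by omega) (by omega)
        rw [htl, hts, hss, canonSeg, if_neg hbs, join_take_succ ss a i ha hlt']

-- ===== VERDICT (by name: the statement is the Claim_ definition above) =====
theorem generate_seg_spec : Claim_equal_generate_seg := by
  unfold Claim_equal_generate_seg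
  intro ts ss _hdom hpre
  obtain ⟨hn, _h0⟩ := hpre
  unfold Spec_generate_seg generate_seg generate_seg_alt
  by_cases hempty : ts = []
  · subst hempty
    rw [generate_seg_loop]
    simp
  · have hlen : 0 < ts.length := List.length_pos_iff.mpr hempty
    have hlen' : 0 < ss.length := by omega
    have hone : String.join ((ss.drop 0).take (1 - 0)) = ss.getD 0 "" := by
      have h0 := join_slice_one ss 0 hlen'
      simpa [List.getD, List.getElem?_eq_getElem hlen'] using h0
    have hB := slicesB_eq ts ss hn (ts.length - 1) 1 0 (by omega) (by omega) (by omega)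
    rw [hone] at hB
    rw [generate_seg_loop]
    simp only [dif_pos hlen, List.nil_append]
    have hA := loopA_eq ts ss hn (ts.length - 1) 1 [] (ss.getD 0 "") (by omega) (by omega)
    simp only [List.nil_append] at hA
    rw [hA, if_neg hempty]
    exact hB.symm
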